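-- pv_equiv track=rewrite | github.com/Inf015/Delta | backend/legacy/scripts/list_sessions.py | filter_sessions
-- ===== SOURCE A (Python) =====
-- def filter_sessions(sessions, car=None, date_filter=None):
--     """Aplica filtros de auto y fecha."""
--     result = sessions
--
--     if car:
--         car_lower = car.lower()
--         result = [s for s in result
--                   if car_lower in s.get('car', '').lower()
--                   or car_lower in s.get('filename', '').lower()]
--
--     if date_filter:
--         result = [s for s in result
--                   if s.get('date_only', '').startswith(date_filter)
--                   or date_filter in s.get('filename', '')]
--
--     return result
-- ===== SOURCE B (Python) =====
-- def filter_sessions(sessions, car=None, date_filter=None):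
--     """Aplica filtros de auto y fecha (single pass)."""
--     if not car and not date_filter:
--         return sessions
--     car_lower = car.lower() if car else None
--
--     def keep(s):
--         ok_car = (car_lower is None
--                   or car_lower in s.get('car', '').lower()
--                   or car_lower in s.get('filename', '').lower())
--         ok_date = (not date_filter
--                    or s.get('date_only', '').startswith(date_filter)
--                    or date_filter in s.get('filename', ''))
--         return ok_car and ok_date
--
--     return [s for s in sessions if keep(s)]
-- ===== Notes on version B (the rewrite author's own statement) =====
-- stated objective: simpler
-- what changed: Replaces A's two sequential list-comprehension passes (each building an intermediate list) with one pass over sessions using a single compound predicate that combines both filters, returning the input unchanged only when both filters are falsy.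
import Mathlib
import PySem

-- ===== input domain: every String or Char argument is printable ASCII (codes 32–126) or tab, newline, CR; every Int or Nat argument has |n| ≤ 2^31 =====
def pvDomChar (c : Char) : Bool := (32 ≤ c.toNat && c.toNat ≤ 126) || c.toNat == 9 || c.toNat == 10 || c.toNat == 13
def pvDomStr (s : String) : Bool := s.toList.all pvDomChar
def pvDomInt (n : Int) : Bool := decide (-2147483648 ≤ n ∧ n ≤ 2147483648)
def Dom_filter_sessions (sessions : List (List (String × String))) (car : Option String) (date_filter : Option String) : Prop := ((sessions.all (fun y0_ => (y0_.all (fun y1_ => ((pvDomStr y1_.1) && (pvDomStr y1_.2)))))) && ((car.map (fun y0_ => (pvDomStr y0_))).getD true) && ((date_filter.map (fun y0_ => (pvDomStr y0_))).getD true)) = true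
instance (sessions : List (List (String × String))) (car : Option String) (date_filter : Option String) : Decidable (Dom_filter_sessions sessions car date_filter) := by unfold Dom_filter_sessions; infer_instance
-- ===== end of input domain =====

-- ===== PORT A =====
-- B replaces A's two sequential filtering passes with one pass using a compound predicate; objective: simpler.
def pvCarPred (c : String) (s : List (String × String)) : Bool :=
  PySem.Str.isIn (PySem.Str.lower c) (PySem.Str.lower (PySem.Dict.getD ⟨s⟩ "car" "")) ||
  PySem.Str.isIn (PySem.Str.lower c) (PySem.Str.lower (PySem.Dict.getD ⟨s⟩ "filename" ""))

def pvDatePred (d : String) (s : List (String × String)) : Bool :=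
  PySem.Str.startswith (PySem.Dict.getD ⟨s⟩ "date_only" "") d ||
  PySem.Str.isIn d (PySem.Dict.getD ⟨s⟩ "filename" "")

def filter_sessions (sessions : List (List (String × String))) (car : Option String) (date_filter : Option String) : List (List (String × String)) :=
  let result := sessions
  let result :=
    match car with
    | none => result
    | some c => if c = "" then result else result.filter (pvCarPred c)
  match date_filter with
  | none => result
  | some d => if d = "" then result else result.filter (pvDatePred d)

-- ===== PORT B =====
def pvTruthy : Option String → Bool
  | none => false
  | some s => s ≠ ""

def pvKeep (car : Option String) (date_filter : Option String) (s : List (String × String)) : Bool :=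
  (!(pvTruthy car) || pvCarPred (car.getD "") s) &&
  (!(pvTruthy date_filter) || pvDatePred (date_filter.getD "") s)

def filter_sessions_alt (sessions : List (List (String × String))) (car : Option String) (date_filter : Option String) : List (List (String × String)) :=
  if !(pvTruthy car) && !(pvTruthy date_filter) then sessions
  else sessions.filter (pvKeep car date_filter)

-- ===== PRECONDITION & SPEC =====
def Spec_filter_sessions (sessions : List (List (String × String))) (car : Option String) (date_filter : Option String) (out : List (List (String × String))) : Prop := out = filter_sessions_alt sessions car date_filter
instance (sessions : List (List (String × String))) (car : Option String) (date_filter : Option String) (out : List (List (String × String))) : Decidable (Spec_filter_sessions sessions car date_filter out) := by unfold Spec_filter_sessions; infer_instance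

-- ===== CLAIM (what is proved, stated in full; the proofs are below) =====
def Claim_equal_filter_sessions : Prop := ∀ (sessions : List (List (String × String))) (car : Option String) (date_filter : Option String), Dom_filter_sessions sessions car date_filter → Spec_filter_sessions sessions car date_filter (filter_sessions sessions car date_filter)

-- ===== LEMMAS AND PROOFS =====

-- ===== VERDICT (by name: the statement is the Claim_ definition above) =====
theorem filter_sessions_spec : Claim_equal_filter_sessions := by
  intro sessions car date_filter _
  unfold Spec_filter_sessions filter_sessions filter_sessions_alt pvKeep pvTruthy
  cases car with
  | none =>
    cases date_filter with
    | none => simp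
    | some d =>
      by_cases hd : d = "" <;> simp [hd]
  | some c =>
    by_cases hc : c = ""
    · cases date_filter with
      | none => simp [hc]
      | some d => by_cases hd : d = "" <;> simp [hc, hd]
    · cases date_filter with
      | none => simp [hc]
      | some d =>
        by_cases hd : d = "" <;>
          simp [hc, hd, List.filter_filter, Bool.and_comm]
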